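-- pv_equiv track=rewrite | github.com/isomjd-code/courthand | cp40_place_latinizer.py | generate_ij_variants
-- ===== SOURCE A (Python) =====
-- from typing import List, Dict, Optional, Set, Tuple
-- from itertools import product
--
-- def generate_ij_variants(text: str) -> Set[str]:
--     """
--     Generate I/J interchange variants.
--
--     In medieval Latin, I and J were not distinct letters. J developed
--     as a variant of I, particularly at the start of words before vowels.
--
--     Args:
--         text: Latin text
--
--     Returns:
--         Set of all I/J variants including the original
--     """
--     if not text:
--         return {text} if text else set()
--
--     variants = set()
--
--     # Find all positions with I or J
--     positions = []
--     for i, char in enumerate(text):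
--         if char in 'IiJj':
--             positions.append(i)
--
--     if not positions:
--         return {text}
--
--     # Generate all combinations of I/J at each position
--     for combo in product(['I', 'J'], repeat=len(positions)):
--         variant = list(text)
--         for pos_idx, char in zip(positions, combo):
--             # Preserve original case
--             if text[pos_idx].isupper():
--                 variant[pos_idx] = char.upper()
--             else:
--                 variant[pos_idx] = char.lower()
--         variants.add(''.join(variant))
--
--     return variants
-- ===== SOURCE B (Python) =====
-- def generate_ij_variants(text: str):
--     """Generate all I/J interchange, case-preserving variants of text.
--
--     Single left-to-right pass growing partial variants, instead of
--     collecting positions and enumerating itertools.product combos.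
--     """
--     if not text:
--         return set()
--     partials = ['']
--     for ch in text:
--         if ch in 'IiJj':
--             i_char = 'I' if ch.isupper() else 'i'
--             j_char = 'J' if ch.isupper() else 'j'
--             partials = [p + d for p in partials for d in (i_char, j_char)]
--         else:
--             partials = [p + ch for p in partials]
--     return set(partials)
-- ===== Notes on version B (the rewrite author's own statement) =====
-- stated objective: alternative
-- what changed: Replaces the collect-positions-then-enumerate-itertools.product-and-patch-a-copy algorithm by a single left-to-right pass that grows a list of partial variants, branching at each I/i/J/j character.
import Mathlib
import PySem

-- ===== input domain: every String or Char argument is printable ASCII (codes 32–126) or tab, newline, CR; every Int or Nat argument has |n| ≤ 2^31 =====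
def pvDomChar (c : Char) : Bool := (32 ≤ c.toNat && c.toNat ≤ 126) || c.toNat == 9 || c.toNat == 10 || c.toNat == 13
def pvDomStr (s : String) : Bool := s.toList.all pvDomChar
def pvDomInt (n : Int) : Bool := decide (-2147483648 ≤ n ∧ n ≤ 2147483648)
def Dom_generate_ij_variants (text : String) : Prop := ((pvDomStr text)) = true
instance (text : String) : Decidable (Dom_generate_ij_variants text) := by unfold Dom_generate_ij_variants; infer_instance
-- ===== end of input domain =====

-- B replaces A's positions + itertools.product enumeration (patching a fresh copy of the
-- text for every combination) by a single left-to-right pass growing partial variants.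

-- ===== PORT A =====
-- transliteration of itertools.product(['I','J'], repeat=n): first coordinate varies slowest
def pvProductIJ : Nat → List (List Char)
  | 0 => [[]]
  | n + 1 => ['I', 'J'].flatMap (fun c => (pvProductIJ n).map (fun t => c :: t))

def generate_ij_variants (text : String) : List String :=
  if text.toList = [] then []  -- 'return {text} if text else set()': text is falsy here, so set()
  else
    let positions : List Int :=
      (PySem.List.enumerate text.toList 0).foldl
        (fun acc p => if p.2 ∈ ['I', 'i', 'J', 'j'] then acc ++ [p.1] else acc) []
    if positions = [] then [text]
    else
      (pvProductIJ positions.length).foldl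
        (fun variants combo =>
          let variant : List Char :=
            (positions.zip combo).foldl
              (fun v pc =>
                if PySem.Chars.isupper (PySem.List.pyGetD text.toList pc.1 ' ')
                then PySem.List.pySetD v pc.1 (PySem.Chars.upperChar pc.2)
                else PySem.List.pySetD v pc.1 (PySem.Chars.lowerChar pc.2))
              text.toList
          PySem.Set.add variants (String.ofList variant))
        PySem.Set.empty

-- ===== PORT B =====
-- strings are handled as List Char (exact); String.ofList rebuilds the Python str values
def generate_ij_variants_alt (text : String) : List String :=
  if text.toList = [] then []
  else
    let partials : List (List Char) :=
      text.toList.foldl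
        (fun ps c =>
          if c ∈ ['I', 'i', 'J', 'j'] then
            ps.flatMap (fun p =>
              [(if PySem.Chars.isupper c then 'I' else 'i'),
               (if PySem.Chars.isupper c then 'J' else 'j')].map (fun d => p ++ [d]))
          else
            ps.map (fun p => p ++ [c]))
        [[]]
    PySem.Set.ofList (partials.map String.ofList)

-- ===== PRECONDITION & SPEC =====
def Spec_generate_ij_variants (text : String) (out : List String) : Prop := out = generate_ij_variants_alt text
instance (text : String) (out : List String) : Decidable (Spec_generate_ij_variants text out) := by unfold Spec_generate_ij_variants; infer_instance

-- ===== CLAIM (what is proved, stated in full; the proofs are below) =====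
def Claim_equal_generate_ij_variants : Prop := ∀ (text : String), Dom_generate_ij_variants text → Spec_generate_ij_variants text (generate_ij_variants text)

-- ===== LEMMAS AND PROOFS =====

def pvIJ (c : Char) : Bool := decide (c ∈ ['I', 'i', 'J', 'j'])

def pvNorm (c d : Char) : Char :=
  if PySem.Chars.isupper c then PySem.Chars.upperChar d else PySem.Chars.lowerChar d

-- the list of ij positions of cs, counted from s
def pvPosI : List Char → Nat → List Int
  | [], _ => []
  | c :: cs, s => if c ∈ ['I', 'i', 'J', 'j'] then (s : Int) :: pvPosI cs (s + 1) else pvPosI cs (s + 1)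

-- all case-preserving I/J variants of cs, in product order
def pvVars : List Char → List (List Char)
  | [] => [[]]
  | c :: cs =>
    if c ∈ ['I', 'i', 'J', 'j'] then
      [pvNorm c 'I', pvNorm c 'J'].flatMap (fun d => (pvVars cs).map (fun t => d :: t))
    else (pvVars cs).map (fun t => c :: t)

-- the variant of cs selected by one combo
def pvMerge : List Char → List Char → List Char
  | [], _ => []
  | c :: cs, combo =>
    if c ∈ ['I', 'i', 'J', 'j'] then pvNorm c (combo.headD 'I') :: pvMerge cs combo.tail
    else c :: pvMerge cs combo

theorem pvProductIJ_length {n : Nat} {combo : List Char} (h : combo ∈ pvProductIJ n) :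
    combo.length = n := by
  induction n generalizing combo with
  | zero => simp [pvProductIJ] at h; simp [h]
  | succ n ih =>
    simp [pvProductIJ] at h
    rcases h with ⟨t, ht, rfl⟩ | ⟨t, ht, rfl⟩ <;> simp [ih ht]

theorem pvPosI_length (cs : List Char) (s : Nat) :
    (pvPosI cs s).length = cs.countP pvIJ := by
  induction cs generalizing s with
  | nil => simp [pvPosI]
  | cons c cs ih =>
    by_cases h : c ∈ ['I', 'i', 'J', 'j'] <;>
      simp [pvPosI, h, ih, pvIJ]

-- A's position-collecting loop
theorem posA (cs : List Char) (s : Nat) (acc : List Int) :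
    (PySem.List.enumerate cs (s : Int)).foldl
      (fun acc p => if p.2 ∈ ['I', 'i', 'J', 'j'] then acc ++ [p.1] else acc) acc
    = acc ++ pvPosI cs s := by
  induction cs generalizing s acc with
  | nil => simp [pvPosI, PySem.List.enumerate_nil]
  | cons c cs ih =>
    rw [PySem.List.enumerate_cons, List.foldl_cons]
    have hcast : (s:Int) + 1 = ((s+1:Nat):Int) := by push_cast; ring
    by_cases h : c ∈ ['I', 'i', 'J', 'j']
    · rw [if_pos h, hcast, ih (s+1), pvPosI, if_pos h]
      simp
    · rw [if_neg h, hcast, ih (s+1), pvPosI, if_neg h]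

-- A's inner patching loop equals pvMerge
theorem buildA (orig : List Char) : ∀ (cs combo U : List Char) (s : Nat),
    s = U.length → orig.drop s = cs → combo.length = cs.countP pvIJ →
    ((pvPosI cs s).zip combo).foldl
      (fun v pc =>
        if PySem.Chars.isupper (PySem.List.pyGetD orig pc.1 ' ')
        then PySem.List.pySetD v pc.1 (PySem.Chars.upperChar pc.2)
        else PySem.List.pySetD v pc.1 (PySem.Chars.lowerChar pc.2))
      (U ++ cs)
    = U ++ pvMerge cs combo := by
  intro cs
  induction cs with
  | nil => intro combo U s _ _ _; simp [pvPosI, pvMerge]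
  | cons c cs ih =>
    intro combo U s hs hdrop hlen
    have hget : PySem.List.pyGetD orig (s : Int) ' ' = c := by
      rw [PySem.List.pyGetD_natCast]
      have h0 : orig[s + 0]? = some c := by
        rw [← List.getElem?_drop, hdrop]; rfl
      have : orig[s]? = some c := by simpa using h0
      simp [List.getD_eq_getElem?_getD, this]
    have hcnt : (c :: cs).countP pvIJ
        = cs.countP pvIJ + (if c ∈ ['I', 'i', 'J', 'j'] then 1 else 0) := by
      rw [List.countP_cons]; by_cases h : c ∈ ['I', 'i', 'J', 'j'] <;> simp [pvIJ, h]
    by_cases h : c ∈ ['I', 'i', 'J', 'j']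
    · rw [hcnt, if_pos h] at hlen
      cases combo with
      | nil => exact absurd hlen (by simp)
      | cons d combo =>
        rw [pvPosI, if_pos h, List.zip_cons_cons, List.foldl_cons]
        have hset : ∀ x, PySem.List.pySetD (U ++ c :: cs) ((s:Nat) : Int) x = U ++ x :: cs := by
          intro x
          rw [PySem.List.pySetD_natCast, hs, List.set_append]
          simp
        have step : (if PySem.Chars.isupper (PySem.List.pyGetD orig ((s:Nat):Int) ' ')
            then PySem.List.pySetD (U ++ c :: cs) ((s:Nat):Int) (PySem.Chars.upperChar d)
            else PySem.List.pySetD (U ++ c :: cs) ((s:Nat):Int) (PySem.Chars.lowerChar d))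
            = U ++ pvNorm c d :: cs := by
          rw [hget, pvNorm]
          by_cases hu : PySem.Chars.isupper c
          · rw [if_pos hu, if_pos hu, hset]
          · rw [if_neg hu, if_neg hu, hset]
        rw [step]
        have hU : U ++ pvNorm c d :: cs = (U ++ [pvNorm c d]) ++ cs := by simp
        rw [hU, ih combo (U ++ [pvNorm c d]) (s+1) (by simp [hs])
          (by rw [← List.drop_drop, hdrop]; rfl) (by simpa using hlen)]
        rw [pvMerge, if_pos h]
        simp
    · rw [pvPosI, if_neg h, pvMerge, if_neg h]
      rw [hcnt, if_neg h] at hlen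
      have hU : U ++ c :: cs = (U ++ [c]) ++ cs := by simp
      rw [hU, ih combo (U ++ [c]) (s+1) (by simp [hs])
        (by rw [← List.drop_drop, hdrop]; rfl) (by simpa using hlen)]
      simp

theorem pvVars_no_ij (cs : List Char) (h : cs.countP pvIJ = 0) : pvVars cs = [cs] := by
  induction cs with
  | nil => rfl
  | cons c cs ih =>
    rw [List.countP_cons] at h
    by_cases hc : c ∈ ['I', 'i', 'J', 'j']
    · simp [pvIJ, hc] at h
    · rw [pvVars, if_neg hc, ih (by simpa [pvIJ, hc] using h)]
      rfl

-- the product enumeration, merged, is exactly pvVars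
theorem product_merge (cs : List Char) :
    (pvProductIJ (cs.countP pvIJ)).map (fun combo => pvMerge cs combo) = pvVars cs := by
  induction cs with
  | nil => rfl
  | cons c cs ih =>
    by_cases h : c ∈ ['I', 'i', 'J', 'j']
    · have hcnt : (c :: cs).countP pvIJ = cs.countP pvIJ + 1 := by
        rw [List.countP_cons]; simp [pvIJ, h]
      rw [hcnt, pvProductIJ, pvVars]
      rw [if_pos h]
      simp only [List.map_flatMap, List.map_map]
      have key : ∀ d : Char,
          ((pvProductIJ (cs.countP pvIJ)).map ((fun combo => pvMerge (c :: cs) combo) ∘ (fun t => d :: t)))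
          = (pvVars cs).map (fun t => pvNorm c d :: t) := by
        intro d
        have : ((fun combo => pvMerge (c :: cs) combo) ∘ (fun t => d :: t))
            = (fun t => pvNorm c d :: t) ∘ (fun combo => pvMerge cs combo) := by
          funext t
          simp only [Function.comp_apply]
          rw [pvMerge, if_pos h]
          rfl
        rw [this, ← List.map_map, ih]
      rw [List.flatMap_cons, List.flatMap_cons, List.flatMap_nil]
      rw [key 'I', key 'J']
      simp [List.flatMap_cons]
    · have hcnt : (c :: cs).countP pvIJ = cs.countP pvIJ := by
        rw [List.countP_cons]; simp [pvIJ, h]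
      rw [hcnt, pvVars]
      rw [if_neg h, ← ih, List.map_map]
      apply List.map_congr_left
      intro combo _
      simp only [Function.comp_apply]
      rw [pvMerge, if_neg h]

-- B's fold grows exactly the pvVars suffix variants
theorem foldB (cs : List Char) (ps : List (List Char)) :
    cs.foldl
      (fun ps c =>
        if c ∈ ['I', 'i', 'J', 'j'] then
          ps.flatMap (fun p =>
            [(if PySem.Chars.isupper c then 'I' else 'i'),
             (if PySem.Chars.isupper c then 'J' else 'j')].map (fun d => p ++ [d]))
        else
          ps.map (fun p => p ++ [c])) ps
    = ps.flatMap (fun p => (pvVars cs).map (fun t => p ++ t)) := by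
  induction cs generalizing ps with
  | nil => simp [pvVars]
  | cons c cs ih =>
    rw [List.foldl_cons, ih]
    by_cases h : c ∈ ['I', 'i', 'J', 'j']
    · rw [if_pos h, pvVars, if_pos h]
      have hI : (if PySem.Chars.isupper c then 'I' else 'i') = pvNorm c 'I' := by
        rw [pvNorm]; by_cases hu : PySem.Chars.isupper c <;> simp [hu] <;> decide
      have hJ : (if PySem.Chars.isupper c then 'J' else 'j') = pvNorm c 'J' := by
        rw [pvNorm]; by_cases hu : PySem.Chars.isupper c <;> simp [hu] <;> decide
      rw [hI, hJ, List.flatMap_assoc]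
      refine List.flatMap_congr ?_
      intro p _
      simp [List.flatMap_cons, List.map_map, Function.comp_def, List.append_assoc]
    · rw [if_neg h, pvVars, if_neg h, List.flatMap_map]
      refine List.flatMap_congr ?_
      intro p _
      simp [List.map_map, Function.comp_def, List.append_assoc]

-- 'for x in l: s.add(f(x))' starting from set() is set(map(f, l))
theorem foldl_add_eq_ofList_map {α β : Type} [BEq β] (l : List α) (f : α → β) :
    l.foldl (fun s x => PySem.Set.add s (f x)) PySem.Set.empty
      = PySem.Set.ofList (l.map f) := by
  rw [PySem.Set.ofList_eq_foldl, List.foldl_map]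
  rfl

-- ===== VERDICT (by name: the statement is the Claim_ definition above) =====
theorem generate_ij_variants_spec : Claim_equal_generate_ij_variants := by
  intro text _
  unfold Spec_generate_ij_variants
  by_cases hnil : text.toList = []
  · simp [generate_ij_variants, generate_ij_variants_alt, hnil]
  · have hpos : (PySem.List.enumerate text.toList 0).foldl
        (fun acc p => if p.2 ∈ ['I', 'i', 'J', 'j'] then acc ++ [p.1] else acc) []
        = pvPosI text.toList 0 := by
      have := posA text.toList 0 []
      simpa using this
    have hB : generate_ij_variants_alt text
        = PySem.Set.ofList ((pvVars text.toList).map String.ofList) := by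
      simp only [generate_ij_variants_alt, if_neg hnil, foldB]
      simp
    by_cases hz : pvPosI text.toList 0 = []
    · have hcnt : text.toList.countP pvIJ = 0 := by
        have := pvPosI_length text.toList 0
        rw [hz] at this
        simpa using this.symm
      have hA : generate_ij_variants text = [text] := by
        simp only [generate_ij_variants, if_neg hnil, hpos, hz]
        simp
      rw [hA, hB, pvVars_no_ij _ hcnt]
      simp [PySem.Set.ofList, PySem.Set.add, String.ofList_toList]
    · have hA : generate_ij_variants text
          = PySem.Set.ofList ((pvVars text.toList).map String.ofList) := by
        simp only [generate_ij_variants, if_neg hnil, hpos, if_neg hz]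
        rw [foldl_add_eq_ofList_map]
        congr 1
        rw [pvPosI_length]
        rw [← product_merge, List.map_map]
        apply List.map_congr_left
        intro combo hm
        simp only [Function.comp_apply]
        congr 1
        have := buildA text.toList text.toList combo [] 0 rfl (by simp)
          (pvProductIJ_length hm)
        simpa using this
      rw [hA, hB]
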